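-- pv_equiv track=rewrite | github.com/yfedoseev/llmkit | scripts/fetch_together_ai.py | get_model_type
-- ===== SOURCE A (Python) =====
-- from typing import Dict, List, Optional
--
-- def get_model_type(model: Dict) -> str:
--     """Determine model type/category."""
--     model_type = model.get("type", "").lower()
--     model_id = model.get("id", "").lower()
--
--     if model_type == "embedding" or "embed" in model_id:
--         return "embed"
--     elif model_type == "image" or any(x in model_id for x in ["flux", "sdxl", "stable-diffusion", "imagen"]):
--         return "image"
--     elif model_type == "audio" or any(x in model_id for x in ["whisper", "sonic", "tts"]):
--         return "audio"
--     elif model_type == "video" or "kling" in model_id: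
--         return "video"
--     elif model_type == "rerank" or "rerank" in model_id:
--         return "rerank"
--     elif model_type == "moderation" or "guard" in model_id:
--         return "moderation"
--     else:
--         return "chat"
-- ===== SOURCE B (Python) =====
-- _GROUPS = [
--     (("embed",), 0),
--     (("flux", "sdxl", "stable-diffusion", "imagen"), 1),
--     (("whisper", "sonic", "tts"), 2),
--     (("kling",), 3),
--     (("rerank",), 4),
--     (("guard",), 5),
-- ]
-- _TYPE_PRIORITY = {"embedding": 0, "image": 1, "audio": 2, "video": 3,
--                   "rerank": 4, "moderation": 5}
-- _LABELS = ("embed", "image", "audio", "video", "rerank", "moderation")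
--
--
-- def get_model_type(model):
--     """Determine model type/category: rank every matching category, keep the best."""
--     model_type = model.get("type", "").lower()
--     model_id = model.get("id", "").lower()
--     hits = [prio for keywords, prio in _GROUPS
--             if any(k in model_id for k in keywords)]
--     if model_type in _TYPE_PRIORITY:
--         hits.append(_TYPE_PRIORITY[model_type])
--     return _LABELS[min(hits)] if hits else "chat"
-- ===== Notes on version B (the rewrite author's own statement) =====
-- stated objective: alternative
-- what changed: Instead of A's short-circuiting first-match if/elif chain, B evaluates every category independently, collects the priorities of all matching categories (keyword hits plus a type lookup), and returns the label of the minimum priority, 'chat' when no category matches.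
import Mathlib
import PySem

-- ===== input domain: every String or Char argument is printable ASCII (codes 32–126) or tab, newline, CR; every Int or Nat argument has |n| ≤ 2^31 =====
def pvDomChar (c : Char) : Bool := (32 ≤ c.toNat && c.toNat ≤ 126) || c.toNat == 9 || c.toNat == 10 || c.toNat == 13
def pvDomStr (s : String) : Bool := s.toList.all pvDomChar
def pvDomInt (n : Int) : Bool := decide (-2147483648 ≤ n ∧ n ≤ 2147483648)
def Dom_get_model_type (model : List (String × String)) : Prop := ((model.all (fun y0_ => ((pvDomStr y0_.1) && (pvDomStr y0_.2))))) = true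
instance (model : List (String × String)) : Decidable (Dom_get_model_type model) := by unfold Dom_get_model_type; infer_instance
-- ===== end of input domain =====

-- B replaces A's short-circuiting if/elif chain by collecting the priorities of ALL
-- matching categories and returning the label of the minimum priority (alternative, same cost).

-- ===== PORT A =====
def get_model_type (model : List (String × String)) : String :=
  let model_type := PySem.Str.lower (PySem.Dict.getD (PySem.Dict.ofList model) "type" "")
  let model_id := PySem.Str.lower (PySem.Dict.getD (PySem.Dict.ofList model) "id" "")
  if model_type == "embedding" || PySem.Str.isIn "embed" model_id then "embed"
  else if model_type == "image" ||
      (["flux", "sdxl", "stable-diffusion", "imagen"].any fun x => PySem.Str.isIn x model_id) then "image"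
  else if model_type == "audio" ||
      (["whisper", "sonic", "tts"].any fun x => PySem.Str.isIn x model_id) then "audio"
  else if model_type == "video" || PySem.Str.isIn "kling" model_id then "video"
  else if model_type == "rerank" || PySem.Str.isIn "rerank" model_id then "rerank"
  else if model_type == "moderation" || PySem.Str.isIn "guard" model_id then "moderation"
  else "chat"

-- ===== PORT B =====
def pvGroups : List (List String × Nat) :=
  [ (["embed"], 0),
    (["flux", "sdxl", "stable-diffusion", "imagen"], 1),
    (["whisper", "sonic", "tts"], 2),
    (["kling"], 3),
    (["rerank"], 4),
    (["guard"], 5) ]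

def pvTypePriority : List (String × Nat) :=
  [("embedding", 0), ("image", 1), ("audio", 2), ("video", 3), ("rerank", 4), ("moderation", 5)]

def pvLabels : List String := ["embed", "image", "audio", "video", "rerank", "moderation"]

def get_model_type_alt (model : List (String × String)) : String :=
  let model_type := PySem.Str.lower (PySem.Dict.getD (PySem.Dict.ofList model) "type" "")
  let model_id := PySem.Str.lower (PySem.Dict.getD (PySem.Dict.ofList model) "id" "")
  let hits := (pvGroups.filter (fun g => g.1.any fun k => PySem.Str.isIn k model_id)).map Prod.snd
  let hits :=
    match pvTypePriority.lookup model_type with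
    | some p => hits ++ [p]
    | none => hits
  match hits.min? with
  | some m => pvLabels.getD m "chat"
  | none => "chat"

-- ===== PRECONDITION & SPEC =====
def Spec_get_model_type (model : List (String × String)) (out : String) : Prop := out = get_model_type_alt model
instance (model : List (String × String)) (out : String) : Decidable (Spec_get_model_type model out) := by unfold Spec_get_model_type; infer_instance

-- ===== CLAIM (what is proved, stated in full; the proofs are below) =====
def Claim_equal_get_model_type : Prop := ∀ (model : List (String × String)), Dom_get_model_type model → Spec_get_model_type model (get_model_type model)

-- ===== LEMMAS AND PROOFS =====

-- ===== VERDICT (by name: the statement is the Claim_ definition above) =====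
theorem get_model_type_spec : Claim_equal_get_model_type := by
  intro model _
  unfold Spec_get_model_type get_model_type get_model_type_alt
  simp only [pvGroups, pvTypePriority, pvLabels, List.filter_cons, List.filter_nil,
    List.lookup, List.any_cons, List.any_nil, Bool.or_false]
  generalize (PySem.Str.lower (PySem.Dict.getD (PySem.Dict.ofList model) "type" "")) = t
  generalize (PySem.Str.lower (PySem.Dict.getD (PySem.Dict.ofList model) "id" "")) = i
  generalize (t == "embedding") = e0
  generalize (t == "image") = e1
  generalize (t == "audio") = e2
  generalize (t == "video") = e3
  generalize (t == "rerank") = e4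
  generalize (t == "moderation") = e5
  generalize (PySem.Str.isIn "embed" i) = k0
  generalize (PySem.Str.isIn "flux" i || (PySem.Str.isIn "sdxl" i ||
    (PySem.Str.isIn "stable-diffusion" i || PySem.Str.isIn "imagen" i))) = k1
  generalize (PySem.Str.isIn "whisper" i || (PySem.Str.isIn "sonic" i || PySem.Str.isIn "tts" i)) = k2
  generalize (PySem.Str.isIn "kling" i) = k3
  generalize (PySem.Str.isIn "rerank" i) = k4
  generalize (PySem.Str.isIn "guard" i) = k5
  revert e0 e1 e2 e3 e4 e5 k0 k1 k2 k3 k4 k5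
  decide
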